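-- pv_equiv track=rewrite | github.com/jonnysassoon/Projects | DataStructuresAndAlgorithms/MiscAlgs/RecursionIntro.py | list_min
-- ===== SOURCE A (Python) =====
-- def list_min(lst, low, high):
--     """
--     Returns the int in lst from the interval [low, high]
--     :param lst: List of ints
--     :return: smallest number
--     """
--     if low == high:
--         return lst[low]
--     else:
--         if lst[low] >= lst[high]:
--             return list_min(lst, low+1, high)
--         else:
--             return list_min(lst, low, high-1)
-- ===== SOURCE B (Python) =====
-- def list_min(lst, low, high):
--     m = lst[low]
--     for i in range(low + 1, high + 1):
--         if lst[i] < m: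
--             m = lst[i]
--     return m
-- ===== Notes on version B (the rewrite author's own statement) =====
-- stated objective: alternative
-- what changed: Replaces the endpoint-comparing recursion (which drops one end of the interval per call) with a single iterative accumulator scan over range(low+1, high+1).
import Mathlib
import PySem

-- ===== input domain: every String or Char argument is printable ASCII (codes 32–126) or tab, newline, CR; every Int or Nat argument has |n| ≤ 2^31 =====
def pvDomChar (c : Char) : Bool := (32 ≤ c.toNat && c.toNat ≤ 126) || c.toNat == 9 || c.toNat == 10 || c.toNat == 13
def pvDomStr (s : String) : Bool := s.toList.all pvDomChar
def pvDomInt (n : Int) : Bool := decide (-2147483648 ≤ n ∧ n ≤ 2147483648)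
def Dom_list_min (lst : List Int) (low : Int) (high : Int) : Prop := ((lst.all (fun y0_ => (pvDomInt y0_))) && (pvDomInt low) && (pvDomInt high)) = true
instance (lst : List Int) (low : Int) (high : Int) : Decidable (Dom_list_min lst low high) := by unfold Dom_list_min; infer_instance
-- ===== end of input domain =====

-- B replaces A's endpoint-comparing recursion by a single iterative accumulator scan; equal return values on Pre_.

-- ===== PORT A =====
-- Fuel equals the Python recursion depth (high-low); under Pre_ the fuel-0 mismatch branch
-- (value 0) is unreachable — in Python low > high diverges into RecursionError/IndexError.
def listMinFuel (lst : List Int) : Nat → Int → Int → Int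
  | 0, low, high => if low = high then PySem.List.pyGetD lst low 0 else 0
  | f+1, low, high =>
    if low = high then PySem.List.pyGetD lst low 0
    else if PySem.List.pyGetD lst high 0 ≤ PySem.List.pyGetD lst low 0
      then listMinFuel lst f (low+1) high
      else listMinFuel lst f low (high-1)

def list_min (lst : List Int) (low : Int) (high : Int) : Int :=
  listMinFuel lst (high - low).toNat low high

-- ===== PORT B =====
def list_min_alt (lst : List Int) (low : Int) (high : Int) : Int :=
  (PySem.List.pyRange (low + 1) (high + 1) 1).foldl
    (fun m i => if PySem.List.pyGetD lst i 0 < m then PySem.List.pyGetD lst i 0 else m)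
    (PySem.List.pyGetD lst low 0)

-- ===== PRECONDITION & SPEC =====
-- Exactly the inputs on which Python's A returns: a nonempty interval low ≤ high whose
-- endpoints are valid (possibly negative) Python indices; outside, A raises IndexError
-- or (for low > high) RecursionError.
def Pre_list_min (lst : List Int) (low : Int) (high : Int) : Prop :=
  low ≤ high ∧ -(lst.length : Int) ≤ low ∧ high < (lst.length : Int)
instance (lst : List Int) (low : Int) (high : Int) : Decidable (Pre_list_min lst low high) := by unfold Pre_list_min; infer_instance

def pvWitness_list_min : List Int × Int × Int := ([3, 1, 2], 0, 2)

def Spec_list_min (lst : List Int) (low : Int) (high : Int) (out : Int) : Prop := out = list_min_alt lst low high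
instance (lst : List Int) (low : Int) (high : Int) (out : Int) : Decidable (Spec_list_min lst low high out) := by unfold Spec_list_min; infer_instance

-- ===== CLAIM (what is proved, stated in full; the proofs are below) =====
def Claim_equal_list_min : Prop := ∀ (lst : List Int) (low : Int) (high : Int), Dom_list_min lst low high → Pre_list_min lst low high → Spec_list_min lst low high (list_min lst low high)

-- ===== LEMMAS AND PROOFS =====

-- A's result is the minimum of the values lst[j], low ≤ j ≤ high.
lemma listMinFuel_min (lst : List Int) :
    ∀ (n : Nat) (low high : Int), low ≤ high → (high - low).toNat = n →
      (∃ i, low ≤ i ∧ i ≤ high ∧ listMinFuel lst n low high = PySem.List.pyGetD lst i 0) ∧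
      (∀ j, low ≤ j → j ≤ high → listMinFuel lst n low high ≤ PySem.List.pyGetD lst j 0) := by
  intro n
  induction n with
  | zero =>
    intro low high hle hfuel
    have heq : low = high := by omega
    subst heq
    refine ⟨⟨low, le_refl _, le_refl _, by simp [listMinFuel]⟩, ?_⟩
    intro j h1 h2
    have : j = low := by omega
    subst this; simp [listMinFuel]
  | succ f ih =>
    intro low high hle hfuel
    have hlt : low < high := by omega
    have hne : ¬ low = high := by omega
    by_cases hcmp : PySem.List.pyGetD lst high 0 ≤ PySem.List.pyGetD lst low 0
    · have hstep : listMinFuel lst (f+1) low high = listMinFuel lst f (low+1) high := by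
        simp [listMinFuel, hne, hcmp]
      obtain ⟨⟨i, hi1, hi2, hiv⟩, hb⟩ := ih (low+1) high (by omega) (by omega)
      refine ⟨⟨i, by omega, hi2, by rw [hstep]; exact hiv⟩, ?_⟩
      intro j h1 h2
      rw [hstep]
      rcases eq_or_lt_of_le h1 with h | h
      · calc listMinFuel lst f (low+1) high ≤ PySem.List.pyGetD lst high 0 := hb high (by omega) (le_refl _)
          _ ≤ PySem.List.pyGetD lst low 0 := hcmp
          _ = PySem.List.pyGetD lst j 0 := by rw [h]
      · exact hb j (by omega) h2
    · have hstep : listMinFuel lst (f+1) low high = listMinFuel lst f low (high-1) := by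
        simp [listMinFuel, hne, hcmp]
      push Not at hcmp
      obtain ⟨⟨i, hi1, hi2, hiv⟩, hb⟩ := ih low (high-1) (by omega) (by omega)
      refine ⟨⟨i, hi1, by omega, by rw [hstep]; exact hiv⟩, ?_⟩
      intro j h1 h2
      rw [hstep]
      rcases eq_or_lt_of_le h2 with h | h
      · calc listMinFuel lst f low (high-1) ≤ PySem.List.pyGetD lst low 0 := hb low (le_refl _) (by omega)
          _ ≤ PySem.List.pyGetD lst high 0 := le_of_lt hcmp
          _ = PySem.List.pyGetD lst j 0 := by rw [← h]
      · exact hb j h1 (by omega)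

-- B's fold computes the minimum of the seed and the values lst[i], a ≤ i < b.
lemma foldl_min_range (lst : List Int) :
    ∀ (n : Nat) (a b : Int) (m : Int), (b - a).toNat = n →
      ((PySem.List.pyRange a b 1).foldl
          (fun m i => if PySem.List.pyGetD lst i 0 < m then PySem.List.pyGetD lst i 0 else m) m = m ∨
        ∃ i, a ≤ i ∧ i < b ∧ (PySem.List.pyRange a b 1).foldl
          (fun m i => if PySem.List.pyGetD lst i 0 < m then PySem.List.pyGetD lst i 0 else m) m = PySem.List.pyGetD lst i 0) ∧
      (PySem.List.pyRange a b 1).foldl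
          (fun m i => if PySem.List.pyGetD lst i 0 < m then PySem.List.pyGetD lst i 0 else m) m ≤ m ∧
      (∀ j, a ≤ j → j < b → (PySem.List.pyRange a b 1).foldl
          (fun m i => if PySem.List.pyGetD lst i 0 < m then PySem.List.pyGetD lst i 0 else m) m ≤ PySem.List.pyGetD lst j 0) := by
  intro n
  induction n with
  | zero =>
    intro a b m hfuel
    rw [PySem.List.pyRange_one_eq_nil (by omega)]
    exact ⟨Or.inl rfl, le_refl _, fun j h1 h2 => absurd (lt_of_le_of_lt h1 h2) (by omega)⟩
  | succ f ih =>
    intro a b m hfuel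
    rw [PySem.List.pyRange_one_cons (by omega)]
    simp only [List.foldl_cons]
    set m' := if PySem.List.pyGetD lst a 0 < m then PySem.List.pyGetD lst a 0 else m with hm'
    obtain ⟨hmem, hlem, hb⟩ := ih (a+1) b m' (by omega)
    have hm'le : m' ≤ m := by rw [hm']; split <;> omega
    have hm'a : m' ≤ PySem.List.pyGetD lst a 0 := by rw [hm']; split <;> omega
    refine ⟨?_, le_trans hlem hm'le, ?_⟩
    · rcases hmem with h | ⟨i, h1, h2, h3⟩
      · rw [h, hm']
        split
        · exact Or.inr ⟨a, le_refl _, by omega, rfl⟩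
        · exact Or.inl rfl
      · exact Or.inr ⟨i, by omega, h2, h3⟩
    · intro j h1 h2
      rcases eq_or_lt_of_le h1 with h | h
      · subst h; exact le_trans hlem hm'a
      · exact hb j (by omega) h2

-- ===== VERDICT (by name: the statement is the Claim_ definition above) =====
theorem list_min_spec : Claim_equal_list_min := by
  intro lst low high _ hpre
  obtain ⟨hle, _, _⟩ := hpre
  unfold Spec_list_min list_min list_min_alt
  obtain ⟨⟨iA, hA1, hA2, hA3⟩, hAb⟩ := listMinFuel_min lst (high - low).toNat low high hle rfl
  obtain ⟨hBmem, hBle, hBb⟩ := foldl_min_range lst ((high + 1) - (low + 1)).toNat (low + 1) (high + 1)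
    (PySem.List.pyGetD lst low 0) rfl
  apply le_antisymm
  · rcases hBmem with h | ⟨i, h1, h2, h3⟩
    · rw [h]; exact hAb low (le_refl _) hle
    · rw [h3]; exact hAb i (by omega) (by omega)
  · rw [hA3]
    rcases eq_or_lt_of_le hA1 with h | h
    · rw [← h]; exact hBle
    · exact hBb iA (by omega) (by omega)
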